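-- pv_equiv track=rewrite | github.com/KarlJohnsonnn/polarcap_analysis | scripts/processing_chain/slurm_job_health_dashboard.py | select_sacct_job_row
-- ===== SOURCE A (Python) =====
-- def select_sacct_job_row(rows: list[dict[str, str]], job_id: str) -> dict[str, str] | None:
--     if not rows:
--         return None
--
--     for row in rows:
--         if row.get("JobIDRaw", "") == job_id:
--             return row
--     for row in rows:
--         rid = row.get("JobIDRaw", "")
--         if rid and "." not in rid and "_" not in rid:
--             return row
--     return rows[0]
-- ===== SOURCE B (Python) =====
-- def select_sacct_job_row(rows: list[dict[str, str]], job_id: str) -> dict[str, str] | None: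
--     if not rows:
--         return None
--     primary = None
--     for row in rows:
--         if row.get("JobIDRaw", "") == job_id:
--             return row
--         if primary is None:
--             rid = row.get("JobIDRaw", "")
--             if rid and "." not in rid and "_" not in rid:
--                 primary = row
--     return primary if primary is not None else rows[0]
-- ===== Notes on version B (the rewrite author's own statement) =====
-- stated objective: simpler
-- what changed: Replaces A's two sequential scans (first for an exact JobIDRaw match, then for a primary-row candidate) with a single pass that returns an exact match immediately and records the first primary candidate as a fallback.
import Mathlib
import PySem

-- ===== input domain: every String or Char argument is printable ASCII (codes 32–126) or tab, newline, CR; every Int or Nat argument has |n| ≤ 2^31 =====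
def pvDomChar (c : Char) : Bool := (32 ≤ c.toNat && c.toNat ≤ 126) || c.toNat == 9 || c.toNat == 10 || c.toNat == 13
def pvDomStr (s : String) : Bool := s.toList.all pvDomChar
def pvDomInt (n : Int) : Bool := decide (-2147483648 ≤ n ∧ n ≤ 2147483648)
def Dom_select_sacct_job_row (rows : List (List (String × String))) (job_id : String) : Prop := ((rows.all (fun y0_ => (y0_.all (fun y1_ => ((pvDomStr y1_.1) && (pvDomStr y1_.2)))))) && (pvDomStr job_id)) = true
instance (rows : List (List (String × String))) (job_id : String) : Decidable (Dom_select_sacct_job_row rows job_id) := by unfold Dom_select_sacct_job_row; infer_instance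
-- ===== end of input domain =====

-- B replaces A's two sequential scans with one pass that records the first primary
-- candidate while looking for an exact match (objective: simpler, same O(n) cost).

-- ===== PORT A =====
-- A's first loop: return the first row whose JobIDRaw equals job_id;
-- A's second loop: return the first row whose JobIDRaw is non-empty with no '.' or '_';
-- else rows[0].  Each early-return loop is ported as List.find? over the same rows.
def select_sacct_job_row (rows : List (List (String × String))) (job_id : String) : Option (List (String × String)) :=
  if rows.isEmpty then none
  else
    match rows.find? (fun row => (row.lookup "JobIDRaw").getD "" == job_id) with
    | some row => some row
    | none =>
      match rows.find? (fun row =>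
          let rid := (row.lookup "JobIDRaw").getD ""
          !(rid == "") && !(PySem.Str.isIn "." rid) && !(PySem.Str.isIn "_" rid)) with
      | some row => some row
      | none => rows.head?

-- ===== PORT B =====
-- B's single loop, carrying the recorded primary fallback as an accumulator.
def select_sacct_job_row_alt_loop (job_id : String) (rows : List (List (String × String)))
    (primary : Option (List (String × String))) : Option (List (String × String)) :=
  match rows with
  | [] => primary
  | row :: rest =>
    if (row.lookup "JobIDRaw").getD "" == job_id then some row
    else
      let primary' :=
        if primary.isNone then
          let rid := (row.lookup "JobIDRaw").getD ""
          if !(rid == "") && !(PySem.Str.isIn "." rid) && !(PySem.Str.isIn "_" rid) then some row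
          else primary
        else primary
      select_sacct_job_row_alt_loop job_id rest primary'

def select_sacct_job_row_alt (rows : List (List (String × String))) (job_id : String) : Option (List (String × String)) :=
  if rows.isEmpty then none
  else
    match select_sacct_job_row_alt_loop job_id rows none with
    | some row => some row
    | none => rows.head?

-- ===== PRECONDITION & SPEC =====
def Spec_select_sacct_job_row (rows : List (List (String × String))) (job_id : String) (out : Option (List (String × String))) : Prop := out = select_sacct_job_row_alt rows job_id
instance (rows : List (List (String × String))) (job_id : String) (out : Option (List (String × String))) : Decidable (Spec_select_sacct_job_row rows job_id out) := by unfold Spec_select_sacct_job_row; infer_instance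

-- ===== CLAIM (what is proved, stated in full; the proofs are below) =====
def Claim_equal_select_sacct_job_row : Prop := ∀ (rows : List (List (String × String))) (job_id : String), Dom_select_sacct_job_row rows job_id → Spec_select_sacct_job_row rows job_id (select_sacct_job_row rows job_id)

-- ===== LEMMAS AND PROOFS =====

-- The one-pass loop equals: first exact match, else the carried primary, else the first primary candidate.
theorem alt_loop_eq (job_id : String) (rows : List (List (String × String)))
    (p : Option (List (String × String))) :
    select_sacct_job_row_alt_loop job_id rows p =
      match rows.find? (fun row => (row.lookup "JobIDRaw").getD "" == job_id) with
      | some row => some row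
      | none =>
        (p.or (rows.find? (fun row =>
          let rid := (row.lookup "JobIDRaw").getD ""
          !(rid == "") && !(PySem.Str.isIn "." rid) && !(PySem.Str.isIn "_" rid)))) := by
  induction rows generalizing p with
  | nil => cases p <;> simp [select_sacct_job_row_alt_loop]
  | cons row rest ih =>
    simp only [select_sacct_job_row_alt_loop]
    by_cases hx : (((row.lookup "JobIDRaw").getD "" == job_id)) = true
    · simp [hx]
    · simp only [Bool.not_eq_true] at hx
      simp only [hx, Bool.false_eq_true, if_false, ih]
      cases p with
      | some v =>
        simp only [Option.isNone_some, Bool.false_eq_true, if_false, List.find?_cons, hx]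
        cases rest.find? (fun row => (row.lookup "JobIDRaw").getD "" == job_id) <;> simp
      | none =>
        simp only [Option.isNone_none, if_true, Option.none_or]
        cases hq : (!(((row.lookup "JobIDRaw").getD "") == "") &&
            !(PySem.Str.isIn "." ((row.lookup "JobIDRaw").getD "")) &&
            !(PySem.Str.isIn "_" ((row.lookup "JobIDRaw").getD ""))) with
        | true =>
          simp only [hq, if_true, List.find?_cons, hx]
          cases rest.find? (fun row => (row.lookup "JobIDRaw").getD "" == job_id) <;> simp
        | false =>
          simp only [hq, Bool.false_eq_true, if_false, Option.none_or, List.find?_cons, hx]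

theorem select_sacct_job_row_eq (rows : List (List (String × String))) (job_id : String) :
    select_sacct_job_row rows job_id = select_sacct_job_row_alt rows job_id := by
  unfold select_sacct_job_row select_sacct_job_row_alt
  by_cases h : rows.isEmpty
  · simp [h]
  · simp only [h, alt_loop_eq]
    cases rows.find? (fun row => (row.lookup "JobIDRaw").getD "" == job_id) <;> simp

-- ===== VERDICT (by name: the statement is the Claim_ definition above) =====
theorem select_sacct_job_row_spec : Claim_equal_select_sacct_job_row := by
  intro rows job_id _
  unfold Spec_select_sacct_job_row
  exact select_sacct_job_row_eq rows job_id
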